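-- pv_equiv track=rewrite | github.com/anitej-c-501/wikipedia__by_llm | article_generator.py | _categorize_snippets
-- ===== SOURCE A (Python) =====
-- from collections import defaultdict
--
-- def _categorize_snippets(topic, snippets):
--     """Categorize snippets into sections"""
--     categories = defaultdict(list)
--
--     for snippet in snippets:
--         # Simple categorization based on content
--         if "history" in snippet.lower():
--             categories["History"].append(snippet)
--         elif "importance" in snippet.lower() or "significance" in snippet.lower():
--             categories["Significance"].append(snippet)
--         elif "recent" in snippet.lower() or "new" in snippet.lower():
--             categories["Recent Developments"].append(snippet)
--         elif "how" in snippet.lower() or "work" in snippet.lower():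
--             categories["How It Works"].append(snippet)
--         else:
--             categories["Overview"].append(snippet)
--
--     return categories
-- ===== SOURCE B (Python) =====
-- from collections import defaultdict
--
-- _KEYWORDS = {
--     "history": "History",
--     "importance": "Significance",
--     "significance": "Significance",
--     "recent": "Recent Developments",
--     "new": "Recent Developments",
--     "how": "How It Works",
--     "work": "How It Works",
-- }
--
--
-- def _classify(snippet):
--     low = snippet.lower()
--     return next((cat for kw, cat in _KEYWORDS.items() if kw in low), "Overview")
--
--
-- def _categorize_snippets(topic, snippets):
--     """Categorize snippets into sections: classify all, then group by category."""
--     cats = [_classify(s) for s in snippets]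
--     result = defaultdict(list)
--     for c in dict.fromkeys(cats):
--         result[c] = [s for s, k in zip(snippets, cats) if k == c]
--     return result
-- ===== Notes on version B (the rewrite author's own statement) =====
-- stated objective: alternative
-- what changed: A builds the dict incrementally, appending each snippet to its section inside one loop; B works in staged passes: it first maps every snippet to a category label via a flat keyword->section table, then derives the key order by deduplicating the label list (dict.fromkeys) and builds each section in one go by filtering the zipped (snippet,label) pairs.
import Mathlib
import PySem

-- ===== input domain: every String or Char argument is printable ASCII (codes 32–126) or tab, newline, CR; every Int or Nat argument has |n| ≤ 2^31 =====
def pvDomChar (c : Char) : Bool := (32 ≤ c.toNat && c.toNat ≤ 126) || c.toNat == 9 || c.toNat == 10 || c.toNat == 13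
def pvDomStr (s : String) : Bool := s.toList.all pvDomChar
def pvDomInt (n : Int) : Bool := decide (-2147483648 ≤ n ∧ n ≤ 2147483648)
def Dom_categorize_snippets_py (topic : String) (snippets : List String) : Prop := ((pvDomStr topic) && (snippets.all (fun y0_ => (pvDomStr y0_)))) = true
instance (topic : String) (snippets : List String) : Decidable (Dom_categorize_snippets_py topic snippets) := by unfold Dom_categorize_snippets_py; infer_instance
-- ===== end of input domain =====

-- B replaces A's single incremental-dict loop with staged passes: classify every
-- snippet via a keyword table, dedup the labels for key order, then group by filtering.

-- ===== PORT A =====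
-- Literal transliteration of A: defaultdict(list) as PySem.Dict; categories[k].append(s)
-- is d.modify k [] (· ++ [s]); the branch chain re-lowercases the snippet per test, as A does.
def categorize_snippets_py (topic : String) (snippets : List String) : List (String × List String) :=
  (snippets.foldl (fun categories snippet =>
    if PySem.Str.isIn "history" (PySem.Str.lower snippet) then
      categories.modify "History" [] (· ++ [snippet])
    else if PySem.Str.isIn "importance" (PySem.Str.lower snippet) || PySem.Str.isIn "significance" (PySem.Str.lower snippet) then
      categories.modify "Significance" [] (· ++ [snippet])
    else if PySem.Str.isIn "recent" (PySem.Str.lower snippet) || PySem.Str.isIn "new" (PySem.Str.lower snippet) then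
      categories.modify "Recent Developments" [] (· ++ [snippet])
    else if PySem.Str.isIn "how" (PySem.Str.lower snippet) || PySem.Str.isIn "work" (PySem.Str.lower snippet) then
      categories.modify "How It Works" [] (· ++ [snippet])
    else
      categories.modify "Overview" [] (· ++ [snippet]))
    (PySem.Dict.empty)).items

-- ===== PORT B =====
-- Source B's flat keyword → section table (_KEYWORDS, in insertion order).
def pvKeywords : List (String × String) :=
  [("history", "History"),
   ("importance", "Significance"),
   ("significance", "Significance"),
   ("recent", "Recent Developments"),
   ("new", "Recent Developments"),
   ("how", "How It Works"),
   ("work", "How It Works")]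

-- Source B's _classify: next() over the table = first match (List.find?), else "Overview".
def pvClassify (snippet : String) : String :=
  match pvKeywords.find? (fun p => PySem.Str.isIn p.1 (PySem.Str.lower snippet)) with
  | some p => p.2
  | none => "Overview"

-- Staged passes: map to labels, dedup the labels (dict.fromkeys) for key order,
-- build each section by filtering the zipped (snippet, label) pairs.
def categorize_snippets_py_alt (topic : String) (snippets : List String) : List (String × List String) :=
  (PySem.List.dedup (snippets.map pvClassify)).map (fun c =>
    (c, ((snippets.zip (snippets.map pvClassify)).filter (fun p => p.2 == c)).map (·.1)))

-- ===== PRECONDITION & SPEC =====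
def Spec_categorize_snippets_py (topic : String) (snippets : List String) (out : List (String × List String)) : Prop := out = categorize_snippets_py_alt topic snippets
instance (topic : String) (snippets : List String) (out : List (String × List String)) : Decidable (Spec_categorize_snippets_py topic snippets out) := by unfold Spec_categorize_snippets_py; infer_instance

-- ===== CLAIM (what is proved, stated in full; the proofs are below) =====
def Claim_equal_categorize_snippets_py : Prop := ∀ (topic : String) (snippets : List String), Dom_categorize_snippets_py topic snippets → Spec_categorize_snippets_py topic snippets (categorize_snippets_py topic snippets)

-- ===== LEMMAS AND PROOFS =====

-- Per-snippet agreement: A's branch chain picks exactly the label B's keyword scan picks.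
theorem pvStep_eq (categories : PySem.Dict String (List String)) (snippet : String) :
    (if PySem.Str.isIn "history" (PySem.Str.lower snippet) then
      categories.modify "History" [] (· ++ [snippet])
    else if PySem.Str.isIn "importance" (PySem.Str.lower snippet) || PySem.Str.isIn "significance" (PySem.Str.lower snippet) then
      categories.modify "Significance" [] (· ++ [snippet])
    else if PySem.Str.isIn "recent" (PySem.Str.lower snippet) || PySem.Str.isIn "new" (PySem.Str.lower snippet) then
      categories.modify "Recent Developments" [] (· ++ [snippet])
    else if PySem.Str.isIn "how" (PySem.Str.lower snippet) || PySem.Str.isIn "work" (PySem.Str.lower snippet) then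
      categories.modify "How It Works" [] (· ++ [snippet])
    else
      categories.modify "Overview" [] (· ++ [snippet]))
    = categories.modify (pvClassify snippet) [] (· ++ [snippet]) := by
  cases hhi : PySem.Str.isIn "history" (PySem.Str.lower snippet) <;>
  cases him : PySem.Str.isIn "importance" (PySem.Str.lower snippet) <;>
  cases hsi : PySem.Str.isIn "significance" (PySem.Str.lower snippet) <;>
  cases hre : PySem.Str.isIn "recent" (PySem.Str.lower snippet) <;>
  cases hne : PySem.Str.isIn "new" (PySem.Str.lower snippet) <;>
  cases hho : PySem.Str.isIn "how" (PySem.Str.lower snippet) <;>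
  cases hwo : PySem.Str.isIn "work" (PySem.Str.lower snippet) <;>
    simp_all [pvClassify, pvKeywords, List.find?]

-- Grouping: the pair-list filter B uses equals the filter of A's (label, snippet) pairs.
theorem pvFilter_eq (snippets : List String) (c : String) :
    ((snippets.zip (snippets.map pvClassify)).filter (fun p => p.2 == c)).map (·.1)
      = ((snippets.map (fun s => (pvClassify s, s))).filter (fun p => p.1 == c)).map (·.2) := by
  induction snippets with
  | nil => rfl
  | cons s rest ih =>
      simp only [List.map_cons, List.zip_cons_cons, List.filter_cons]
      by_cases h : pvClassify s == c <;> simp [h, ih]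

-- ===== VERDICT (by name: the statement is the Claim_ definition above) =====
theorem categorize_snippets_py_spec : Claim_equal_categorize_snippets_py := by
  intro topic snippets _
  unfold Spec_categorize_snippets_py categorize_snippets_py categorize_snippets_py_alt
  simp only [pvStep_eq]
  set D := snippets.foldl (fun d s => d.modify (pvClassify s) [] (· ++ [s])) PySem.Dict.empty with hD
  have hkeys : D.keys = PySem.Set.ofList (snippets.map pvClassify) := by
    rw [hD, PySem.Dict.keys_foldl_modify_key snippets pvClassify [] (fun _ s v => v ++ [s])]
    simp [PySem.Set.update_nil_left]
  have hnodup : D.keys.Nodup := by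
    rw [hkeys]; exact PySem.Set.nodup_ofList _
  have hfold : D = (snippets.map (fun s => (pvClassify s, s))).foldl
      (fun d p => d.modify p.1 [] (· ++ [p.2])) PySem.Dict.empty := by
    rw [hD, List.foldl_map]
  have hgetD : ∀ c, D.getD c [] = ((snippets.map (fun s => (pvClassify s, s))).filter (fun p => p.1 == c)).map (·.2) := by
    intro c
    rw [hfold, PySem.Dict.getD_foldl_modify_append]
    simp
  rw [PySem.Dict.items_eq_map_keys D hnodup [], hkeys, PySem.List.dedup_eq_ofList]
  apply List.map_congr_left
  intro c _
  rw [hgetD c, pvFilter_eq]
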